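-- pv_equiv track=rewrite | github.com/rafalp/Misago | misago/categories/mptt.py | heal_tree
-- ===== SOURCE A (Python) =====
-- def heal_tree(tree_id: int, categories: dict[int, dict]) -> list[dict]:
--     healed_categories: list[dict] = []
--     categories_branches: dict[int, list[dict]] = {0: []}
--
--     for category_id in categories:
--         categories_branches[category_id] = []
--
--     for category in categories.values():
--         if category["tree_id"] == tree_id:
--             category_copy = category.copy()
--             healed_categories.append(category_copy)
--             categories_branches[category["parent_id"] or 0].append(category_copy)
--
--     position = 0
--     for category in categories_branches[0]:
--         position = heal_category(category, categories_branches, position)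
--
--     return healed_categories
--
-- def heal_category(
--     category: dict,
--     categories_branches: dict[int, list[dict]],
--     position: int,
--     level: int = 0,
-- ) -> int:
--     category["level"] = level
--
--     position += 1
--     category["lft"] = position
--
--     for child in categories_branches[category["id"]]:
--         position = heal_category(child, categories_branches, position, level + 1)
--
--     position += 1
--     category["rght"] = position
--
--     return position
-- ===== SOURCE B (Python) =====
-- def heal_tree(tree_id, categories):
--     healed_categories = []
--     categories_branches = {0: []}
--
--     for category_id in categories:
--         categories_branches[category_id] = []
--
--     for category in categories.values():
--         if category["tree_id"] == tree_id:
--             category_copy = category.copy()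
--             healed_categories.append(category_copy)
--             categories_branches[category["parent_id"] or 0].append(category_copy)
--
--     # iterative DFS with an explicit stack of (node, level, closing) frames
--     position = 0
--     stack = [(node, 0, False) for node in reversed(categories_branches[0])]
--     while stack:
--         node, level, closing = stack.pop()
--         if closing:
--             position += 1
--             node["rght"] = position
--         else:
--             node["level"] = level
--             position += 1
--             node["lft"] = position
--             stack.append((node, level, True))
--             for child in reversed(categories_branches[node["id"]]):
--                 stack.append((child, level + 1, False))
--     return healed_categories
-- ===== Notes on version B (the rewrite author's own statement) =====
-- stated objective: alternative
-- what changed: heal_category's recursion is folded into heal_tree as an iterative DFS over an explicit stack of (node, level, phase) frames; the build phase and all dict updates are unchanged.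
import Mathlib
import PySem

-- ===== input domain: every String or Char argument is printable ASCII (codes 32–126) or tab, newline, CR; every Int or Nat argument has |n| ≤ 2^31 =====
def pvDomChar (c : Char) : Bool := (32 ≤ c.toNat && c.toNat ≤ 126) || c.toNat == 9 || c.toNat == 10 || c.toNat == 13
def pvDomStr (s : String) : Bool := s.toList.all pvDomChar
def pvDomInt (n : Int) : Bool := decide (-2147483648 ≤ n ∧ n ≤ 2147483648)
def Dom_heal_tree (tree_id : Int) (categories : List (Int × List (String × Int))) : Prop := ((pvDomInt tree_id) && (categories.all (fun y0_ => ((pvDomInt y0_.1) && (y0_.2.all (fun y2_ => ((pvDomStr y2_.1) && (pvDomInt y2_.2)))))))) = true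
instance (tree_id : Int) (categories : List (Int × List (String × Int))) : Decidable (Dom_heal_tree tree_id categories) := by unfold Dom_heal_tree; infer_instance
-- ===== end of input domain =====

-- B re-implements the DFS of heal_category as an explicit (node, level, phase) stack inside heal_tree
-- (same build phase, same dict-update order); equal return value, no speed claim.

-- ===== PORT A =====
-- Python dict objects are modelled as a store `List (List (String × Int))` of the copied dicts,
-- indexed by their position in healed_categories; branch lists hold store indices (aliasing-exact).
-- Shared dict-on-raw-list helpers (value dicts arrive as plain association lists):
def pvDSet (d : List (String × Int)) (k : String) (v : Int) : List (String × Int) :=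
  ((PySem.Dict.mk d).insert k v).items          -- d[k] = v (overwrite in place / append)
def pvDGet (d : List (String × Int)) (k : String) : Int :=
  ((PySem.Dict.mk d).get? k).getD 0             -- d[k]; total guard: Pre_ keeps the key present

-- the two build loops of heal_tree (identical in A and in B, per B's design)
def pvBuild (tree_id : Int) (categories : List (Int × List (String × Int))) :
    List (List (String × Int)) × PySem.Dict Int (List Nat) :=
  let branches := categories.foldl (fun b kv => b.insert kv.1 [])
      ((PySem.Dict.empty).insert 0 [])
  categories.foldl
    (fun st kv =>
      if pvDGet kv.2 "tree_id" == tree_id then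
        -- `category["parent_id"] or 0` equals parent_id itself on ints (0 is the only falsy int)
        let parent := pvDGet kv.2 "parent_id"
        (st.1 ++ [kv.2], st.2.insert parent (st.2.getD parent [] ++ [st.1.length]))
      else st)
    ([], branches)

-- heal_category, recursion bounded by fuel (a totality guard only: Pre_ keeps the real
-- recursion depth below categories.length + 1, the fuel heal_tree passes)
def healCategory (branches : PySem.Dict Int (List Nat)) :
    Nat → List (List (String × Int)) → Nat → Int → Int →
    List (List (String × Int)) × Int
  | 0, store, _, pos, _ => (store, pos)
  | f + 1, store, idx, pos, level =>
    let cat := pvDSet (store.getD idx []) "level" level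
    let pos := pos + 1
    let cat := pvDSet cat "lft" pos
    let store := store.set idx cat
    let sp := (branches.getD (pvDGet cat "id") []).foldl
        (fun sp c => healCategory branches f sp.1 c sp.2 (level + 1)) (store, pos)
    (sp.1.set idx (pvDSet (sp.1.getD idx []) "rght" (sp.2 + 1)), sp.2 + 1)

def heal_tree (tree_id : Int) (categories : List (Int × List (String × Int))) : List (List (String × Int)) :=
  let sb := pvBuild tree_id categories
  ((sb.2.getD 0 []).foldl
      (fun sp c => healCategory sb.2 (categories.length + 1) sp.1 c sp.2 0) (sb.1, 0)).1

-- ===== PORT B =====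
-- frame weight / stack measure: gas budget for the stack loop (a totality guard only;
-- the measure strictly decreases at every step, so the budget is never exhausted)
def pvWeight (B : Nat) (fr : Nat × Int × Nat × Bool) : Nat :=
  if fr.2.2.2 then 1 else (B + 2) ^ (fr.2.2.1 + 1)
def pvMu (B : Nat) (frames : List (Nat × Int × Nat × Bool)) : Nat :=
  (frames.map (pvWeight B)).sum

-- the while-stack loop of B: frames are (store index, level, fuel, closing phase);
-- the frame fuel mirrors healCategory's fuel and the gas argument is the totality guard.
-- Source B pushes children reversed onto a tail stack; here the frame LIST's head is the
-- stack top, so children are prepended in original order — the pop order is identical.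
def runStack (branches : PySem.Dict Int (List Nat)) :
    Nat → List (Nat × Int × Nat × Bool) → List (List (String × Int)) → Int →
    List (List (String × Int)) × Int
  | 0, _, store, pos => (store, pos)
  | _ + 1, [], store, pos => (store, pos)
  | g + 1, (idx, _, _, true) :: rest, store, pos =>
    runStack branches g rest (store.set idx (pvDSet (store.getD idx []) "rght" (pos + 1))) (pos + 1)
  | g + 1, (_, _, 0, false) :: rest, store, pos => runStack branches g rest store pos
  | g + 1, (idx, level, f + 1, false) :: rest, store, pos =>
    let cat := pvDSet (pvDSet (store.getD idx []) "level" level) "lft" (pos + 1)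
    runStack branches g
      (((branches.getD (pvDGet cat "id") []).map fun c => (c, level + 1, f, false))
        ++ (idx, level, 0, true) :: rest)
      (store.set idx cat) (pos + 1)

def heal_tree_alt (tree_id : Int) (categories : List (Int × List (String × Int))) : List (List (String × Int)) :=
  let sb := pvBuild tree_id categories
  let frames := (sb.2.getD 0 []).map fun c => (c, (0 : Int), categories.length + 1, false)
  (runStack sb.2 (pvMu ((sb.2.values.map List.length).sum) frames) frames sb.1 0).1

-- ===== PRECONDITION & SPEC =====
-- Pre_ excludes the inputs on which Python A raises — a category dict missing "tree_id",
-- a selected one missing "parent_id" or whose parent id names no branch (KeyError), and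
-- id/key mismatches, a selected key 0, or duplicate keys, which can send heal_category into
-- unbounded recursion (RecursionError); these closed-form conditions over-approximate slightly,
-- also excluding some inputs on which A returns because a malformed category is never visited
-- (see the cited examples: A and B agree there too).  Duplicate keys cannot arise from a real
-- Python dict; they are excluded so the association lists denote dicts.
def Pre_heal_tree (tree_id : Int) (categories : List (Int × List (String × Int))) : Prop :=
  (categories.map Prod.fst).Nodup ∧
  ∀ kv ∈ categories,
    (kv.2.map Prod.fst).Nodup ∧
    ((PySem.Dict.mk kv.2).get? "tree_id").isSome = true ∧
    ((PySem.Dict.mk kv.2).get? "tree_id" = some tree_id →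
      kv.1 ≠ 0 ∧
      (PySem.Dict.mk kv.2).get? "id" = some kv.1 ∧
      ((PySem.Dict.mk kv.2).get? "parent_id").isSome = true ∧
      (((PySem.Dict.mk kv.2).get? "parent_id").getD 0 = 0 ∨
        ((PySem.Dict.mk kv.2).get? "parent_id").getD 0 ∈ categories.map Prod.fst))
instance (tree_id : Int) (categories : List (Int × List (String × Int))) : Decidable (Pre_heal_tree tree_id categories) := by unfold Pre_heal_tree; infer_instance

def pvWitness_heal_tree : Int × (List (Int × List (String × Int))) :=
  (1, [(2, [("tree_id", 1), ("parent_id", 0), ("id", 2)]),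
       (3, [("tree_id", 1), ("parent_id", 2), ("id", 3)])])

def Spec_heal_tree (tree_id : Int) (categories : List (Int × List (String × Int))) (out : List (List (String × Int))) : Prop := out = heal_tree_alt tree_id categories
instance (tree_id : Int) (categories : List (Int × List (String × Int))) (out : List (List (String × Int))) : Decidable (Spec_heal_tree tree_id categories out) := by unfold Spec_heal_tree; infer_instance

-- ===== CLAIM (what is proved, stated in full; the proofs are below) =====
def Claim_equal_heal_tree : Prop := ∀ (tree_id : Int) (categories : List (Int × List (String × Int))), Dom_heal_tree tree_id categories → Pre_heal_tree tree_id categories → Spec_heal_tree tree_id categories (heal_tree tree_id categories)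

-- ===== LEMMAS AND PROOFS =====

lemma pv_one_le_weight (B : Nat) (fr : Nat × Int × Nat × Bool) : 1 ≤ pvWeight B fr := by
  unfold pvWeight
  split
  · exact Nat.le_refl 1
  · exact Nat.one_le_pow _ _ (by omega)

lemma pv_mu_cons (B : Nat) (fr : Nat × Int × Nat × Bool) (rest : List (Nat × Int × Nat × Bool)) :
    pvMu B (fr :: rest) = pvWeight B fr + pvMu B rest := by
  simp [pvMu]

lemma pvGetD_len_le (br : PySem.Dict Int (List Nat)) (k : Int) :
    (br.getD k []).length ≤ (br.values.map List.length).sum := by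
  unfold PySem.Dict.getD PySem.Dict.get?
  cases h : br.items.find? (fun p => p.1 == k) with
  | none => simp
  | some p =>
    have hmem : p.2.length ∈ br.values.map List.length := by
      simp only [PySem.Dict.values, List.map_map, List.mem_map]
      exact ⟨p, List.mem_of_find?_eq_some h, rfl⟩
    simpa [h] using List.le_sum_of_mem (by simpa using hmem)

-- an enter step strictly decreases the stack measure
lemma pv_mu_enter_lt (B : Nat) (cs : List Nat) (lv : Int) (f : Nat) (idx : Nat) (level : Int)
    (rest : List (Nat × Int × Nat × Bool)) (hcs : cs.length ≤ B) :
    pvMu B ((cs.map fun c => (c, lv, f, false)) ++ (idx, level, 0, true) :: rest)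
      < pvMu B ((idx, level, f + 1, false) :: rest) := by
  unfold pvMu
  simp only [List.map_append, List.map_map, List.map_cons, List.sum_append, List.sum_cons,
    Function.comp_def, pvWeight, if_true, if_neg Bool.false_ne_true]
  simp only [List.map_const', List.sum_replicate, smul_eq_mul]
  have hX : 1 ≤ (B + 2) ^ (f + 1) := Nat.one_le_pow _ _ (by omega)
  have hmul : cs.length * (B + 2) ^ (f + 1) ≤ B * (B + 2) ^ (f + 1) :=
    Nat.mul_le_mul_right _ hcs
  have hpow : (B + 2) ^ (f + 1 + 1) = B * (B + 2) ^ (f + 1) + 2 * (B + 2) ^ (f + 1) := by ring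
  omega

-- any two sufficient gas budgets give the same run
lemma pv_gas_irrel (br : PySem.Dict Int (List Nat)) :
    ∀ (g1 : Nat) (frames : List (Nat × Int × Nat × Bool)) (store : List (List (String × Int)))
      (pos : Int) (g2 : Nat),
      pvMu ((br.values.map List.length).sum) frames ≤ g1 →
      pvMu ((br.values.map List.length).sum) frames ≤ g2 →
      runStack br g1 frames store pos = runStack br g2 frames store pos := by
  intro g1
  induction g1 with
  | zero =>
    intro frames store pos g2 h1 _
    cases frames with
    | nil => cases g2 <;> rfl
    | cons fr rest =>
      exfalso
      have := pv_one_le_weight ((br.values.map List.length).sum) fr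
      rw [pv_mu_cons] at h1; omega
  | succ h ih =>
    intro frames store pos g2 h1 h2
    cases frames with
    | nil => cases g2 <;> rfl
    | cons fr rest =>
      have hw := pv_one_le_weight ((br.values.map List.length).sum) fr
      rw [pv_mu_cons] at h1 h2
      cases g2 with
      | zero => omega
      | succ k =>
        obtain ⟨idx, level, f, phase⟩ := fr
        cases phase with
        | true =>
          simp only [runStack]
          simp only [pvWeight, if_true] at h1 h2
          exact ih _ _ _ _ (by omega) (by omega)
        | false =>
          cases f with
          | zero =>
            simp only [runStack]
            have hw1 : (1 : Nat) ≤ pvWeight ((br.values.map List.length).sum) (idx, level, 0, false) :=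
              pv_one_le_weight _ _
            exact ih _ _ _ _ (by omega) (by omega)
          | succ f =>
            simp only [runStack]
            have hlt := pv_mu_enter_lt ((br.values.map List.length).sum)
              (br.getD (pvDGet (pvDSet (pvDSet (store.getD idx []) "level" level) "lft" (pos + 1)) "id") [])
              (level + 1) f idx level rest (pvGetD_len_le _ _)
            rw [pv_mu_cons] at hlt
            simp only [pvWeight, if_neg Bool.false_ne_true] at hlt h1 h2
            exact ih _ _ _ _ (by omega) (by omega)

-- one stack phase of B simulates one heal_category call of A (for any sufficient gas;
-- both ports bound the recursion by the same per-frame fuel)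
lemma pv_sim (br : PySem.Dict Int (List Nat)) :
    ∀ (f : Nat) (idx : Nat) (level : Int) (store : List (List (String × Int))) (pos : Int)
      (rest : List (Nat × Int × Nat × Bool)) (g : Nat),
      pvMu ((br.values.map List.length).sum) ((idx, level, f, false) :: rest) ≤ g →
      runStack br g ((idx, level, f, false) :: rest) store pos
        = runStack br (pvMu ((br.values.map List.length).sum) rest) rest
            (healCategory br f store idx pos level).1
            (healCategory br f store idx pos level).2 := by
  intro f
  induction f with
  | zero =>
    intro idx level store pos rest g hg
    rw [pv_mu_cons] at hg
    have hw : (1 : Nat) ≤ pvWeight ((br.values.map List.length).sum) (idx, level, 0, false) :=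
      pv_one_le_weight _ _
    cases g with
    | zero => omega
    | succ h =>
      simp only [runStack, healCategory]
      exact pv_gas_irrel br _ _ _ _ _ (by omega) (Nat.le_refl _)
  | succ f ih =>
    have aux : ∀ (cs : List Nat) (level : Int) store pos rest g,
        pvMu ((br.values.map List.length).sum) ((cs.map fun c => (c, level, f, false)) ++ rest) ≤ g →
        runStack br g ((cs.map fun c => (c, level, f, false)) ++ rest) store pos
          = runStack br (pvMu ((br.values.map List.length).sum) rest) rest
              (cs.foldl (fun sp c => healCategory br f sp.1 c sp.2 level) (store, pos)).1
              (cs.foldl (fun sp c => healCategory br f sp.1 c sp.2 level) (store, pos)).2 := by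
      intro cs
      induction cs with
      | nil =>
        intro level store pos rest g hg
        simp only [List.map_nil, List.nil_append, List.foldl_nil]
        exact pv_gas_irrel br _ _ _ _ _ (by simpa using hg) (Nat.le_refl _)
      | cons c cs ihc =>
        intro level store pos rest g hg
        simp only [List.map_cons, List.cons_append, List.foldl_cons]
        rw [ih c level store pos ((cs.map fun c => (c, level, f, false)) ++ rest) g
          (by simpa using hg)]
        exact ihc _ _ _ _ _ (Nat.le_refl _)
    intro idx level store pos rest g hg
    cases g with
    | zero =>
      exfalso
      rw [pv_mu_cons] at hg
      have := pv_one_le_weight ((br.values.map List.length).sum) (idx, level, f + 1, false)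
      omega
    | succ h =>
      have hlt := pv_mu_enter_lt ((br.values.map List.length).sum)
        (br.getD (pvDGet (pvDSet (pvDSet (store.getD idx []) "level" level) "lft" (pos + 1)) "id") [])
        (level + 1) f idx level rest (pvGetD_len_le _ _)
      rw [pv_mu_cons] at hg hlt
      simp only [pvWeight, if_neg Bool.false_ne_true] at hg hlt
      simp only [runStack, healCategory]
      rw [aux _ _ _ _ _ h (by omega)]
      rw [pv_mu_cons]
      have hwex : pvWeight ((br.values.map List.length).sum) (idx, level, 0, true) = 1 := by
        simp [pvWeight]
      rw [hwex, Nat.add_comm]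
      simp only [runStack]

-- ===== VERDICT (by name: the statement is the Claim_ definition above) =====
theorem heal_tree_spec : Claim_equal_heal_tree := by
  intro tree_id categories _ _
  unfold Spec_heal_tree
  have aux : ∀ (br : PySem.Dict Int (List Nat)) (f : Nat) (cs : List Nat)
      (store : List (List (String × Int))) (pos : Int),
      (cs.foldl (fun sp c => healCategory br f sp.1 c sp.2 0) (store, pos))
        = runStack br (pvMu ((br.values.map List.length).sum) (cs.map fun c => (c, (0 : Int), f, false)))
            (cs.map fun c => (c, (0 : Int), f, false)) store pos := by
    intro br f cs
    induction cs with
    | nil => intro store pos; rfl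
    | cons c cs ihc =>
      intro store pos
      simp only [List.foldl_cons, List.map_cons]
      rw [pv_sim br f c 0 store pos (cs.map fun c => (c, (0 : Int), f, false))
        (pvMu ((br.values.map List.length).sum) ((c, (0:Int), f, false) :: cs.map fun c => (c, (0:Int), f, false)))
        (Nat.le_refl _)]
      rw [ihc]
  simp only [heal_tree, heal_tree_alt]
  rw [aux]
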